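-- pv_equiv track=rewrite | github.com/conner0910/Computer-Vision | prprc.py | sobelyfun
-- ===== SOURCE A (Python) =====
-- def sobelyfun(img, rows, col):
--     sobely = [[0 for x in range(col)] for y in range(rows)]
--     for i in range(rows):
--         for j in range(col):
--             if i - 1 >= 0 and j - 1 >= 0 and i + 1 < rows and j + 1 < col: #reg case
--                 left = img[i][j - 1] * 0
--                 topLeft = img[i - 1][j - 1] * 1
--                 top = img[i - 1][j] * 2
--                 topRight = img[i - 1][j + 1] * 1
--                 right = img[i][j + 1] * 0
--                 botRight = img[i + 1][j + 1] * -1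
--                 bot = img[i + 1][j] * -2
--                 botLeft = img[i + 1][j - 1] * -1
--                 sum = left + topLeft + top + topRight + right + botRight + bot + botLeft
--                 sobely[i][j] = abs(sum)
--     return sobely
-- ===== SOURCE B (Python) =====
-- def sobelyfun(img, rows, col):
--     if rows < 3 or col < 3:
--         return [[0] * col for _ in range(rows)]
--     T = [[img[i][j - 1] + 2 * img[i][j] + img[i][j + 1] for j in range(1, col - 1)]
--          for i in range(rows)]
--     out = [[0] * col]
--     for i in range(1, rows - 1):
--         out.append([0] + [abs(T[i - 1][k] - T[i + 1][k]) for k in range(col - 2)] + [0])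
--     out.append([0] * col)
--     return out
-- ===== Notes on version B (the rewrite author's own statement) =====
-- stated objective: alternative
-- what changed: Replaces the single pass applying the full 3x3 Sobel-Y kernel per pixel with the separable decomposition: one pass builds a horizontal smoothing table T[i][k] = img[i][k] + 2*img[i][k+1] + img[i][k+2], a second pass emits |T[i-1][k] - T[i+1][k]| for interior pixels, with border rows/columns assembled as explicit zero lists instead of in-place writes into a zero matrix.
import Mathlib
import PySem

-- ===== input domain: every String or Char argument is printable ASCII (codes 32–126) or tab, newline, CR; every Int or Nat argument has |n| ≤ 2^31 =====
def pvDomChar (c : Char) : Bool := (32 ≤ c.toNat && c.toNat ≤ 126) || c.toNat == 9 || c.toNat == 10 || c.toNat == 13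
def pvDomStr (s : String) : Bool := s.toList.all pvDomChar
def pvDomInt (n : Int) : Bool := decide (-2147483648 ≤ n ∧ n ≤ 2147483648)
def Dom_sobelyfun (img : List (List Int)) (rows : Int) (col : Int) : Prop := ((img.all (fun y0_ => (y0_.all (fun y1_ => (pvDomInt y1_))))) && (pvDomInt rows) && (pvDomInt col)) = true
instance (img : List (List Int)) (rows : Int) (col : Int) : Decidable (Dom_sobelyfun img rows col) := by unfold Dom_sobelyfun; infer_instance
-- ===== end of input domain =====

-- B replaces A's single pass with the eight-neighbour kernel by the separable decomposition of the
-- Sobel-Y kernel: a horizontal smoothing table T (row[j-1]+2*row[j]+row[j+1]) built once, then a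
-- pass taking |T[i-1][k] - T[i+1][k]| (objective: alternative; same return values).

-- shared read helper: img[i][j] in total form (Pre_ keeps every read performed by the Pythons in range)
def pvAt (img : List (List Int)) (i j : Int) : Int :=
  PySem.List.pyGetD (PySem.List.pyGetD img i []) j 0

-- ===== PORT A =====
def sobelyfun (img : List (List Int)) (rows : Int) (col : Int) : List (List Int) :=
  let sobely := (PySem.List.pyRange 0 rows 1).map
    (fun _ => (PySem.List.pyRange 0 col 1).map (fun _ => (0 : Int)))
  (PySem.List.pyRange 0 rows 1).foldl (fun sobely i =>
    (PySem.List.pyRange 0 col 1).foldl (fun sobely j =>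
      if i - 1 ≥ 0 ∧ j - 1 ≥ 0 ∧ i + 1 < rows ∧ j + 1 < col then
        let left := pvAt img i (j - 1) * 0
        let topLeft := pvAt img (i - 1) (j - 1) * 1
        let top := pvAt img (i - 1) j * 2
        let topRight := pvAt img (i - 1) (j + 1) * 1
        let right := pvAt img i (j + 1) * 0
        let botRight := pvAt img (i + 1) (j + 1) * (-1)
        let bot := pvAt img (i + 1) j * (-2)
        let botLeft := pvAt img (i + 1) (j - 1) * (-1)
        let sum := left + topLeft + top + topRight + right + botRight + bot + botLeft
        PySem.List.pySetD sobely i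
          (PySem.List.pySetD (PySem.List.pyGetD sobely i []) j |sum|)
      else sobely) sobely) sobely

-- ===== PORT B =====
def sobelyfun_alt (img : List (List Int)) (rows : Int) (col : Int) : List (List Int) :=
  if rows < 3 ∨ col < 3 then
    (PySem.List.pyRange 0 rows 1).map (fun _ => PySem.List.pyRepeat [(0 : Int)] col)
  else
    let T := (PySem.List.pyRange 0 rows 1).map (fun i =>
      (PySem.List.pyRange 1 (col - 1) 1).map (fun j =>
        pvAt img i (j - 1) + 2 * pvAt img i j + pvAt img i (j + 1)))
    let out := [PySem.List.pyRepeat [(0 : Int)] col]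
    let out := (PySem.List.pyRange 1 (rows - 1) 1).foldl (fun out i =>
      out ++ [[(0 : Int)] ++
        (PySem.List.pyRange 0 (col - 2) 1).map (fun k =>
          |pvAt T (i - 1) k - pvAt T (i + 1) k|) ++ [(0 : Int)]]) out
    out ++ [PySem.List.pyRepeat [(0 : Int)] col]

-- ===== PRECONDITION & SPEC =====
-- Pre_ is exactly the set of inputs on which the Python A returns (no IndexError): when there is
-- an interior to visit (rows ≥ 3 and col ≥ 3) A reads all of img's first `rows` rows at columns
-- up to col-1, so img must have at least `rows` rows, each of length at least col.
def Pre_sobelyfun (img : List (List Int)) (rows : Int) (col : Int) : Prop :=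
  rows < 3 ∨ col < 3 ∨
    (rows ≤ (img.length : Int) ∧ ∀ r ∈ img.take rows.toNat, col ≤ (r.length : Int))
instance (img : List (List Int)) (rows : Int) (col : Int) : Decidable (Pre_sobelyfun img rows col) := by unfold Pre_sobelyfun; infer_instance

def pvWitness_sobelyfun : List (List Int) × Int × Int :=
  ([[1, 2, 3], [4, 5, 6], [7, 8, 9]], 3, 3)

def Spec_sobelyfun (img : List (List Int)) (rows : Int) (col : Int) (out : List (List Int)) : Prop := out = sobelyfun_alt img rows col
instance (img : List (List Int)) (rows : Int) (col : Int) (out : List (List Int)) : Decidable (Spec_sobelyfun img rows col out) := by unfold Spec_sobelyfun; infer_instance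

-- ===== CLAIM (what is proved, stated in full; the proofs are below) =====
def Claim_equal_sobelyfun : Prop := ∀ (img : List (List Int)) (rows : Int) (col : Int), Dom_sobelyfun img rows col → Pre_sobelyfun img rows col → Spec_sobelyfun img rows col (sobelyfun img rows col)

-- ===== LEMMAS AND PROOFS =====

-- the common elementwise description both ports are reduced to
def pvCanon (img : List (List Int)) (rows col : Int) : List (List Int) :=
  (List.range rows.toNat).map (fun (i : Nat) => (List.range col.toNat).map (fun (j : Nat) =>
    if 1 ≤ (i : Int) ∧ 1 ≤ (j : Int) ∧ (i : Int) + 1 < rows ∧ (j : Int) + 1 < col then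
      |pvAt img ((i : Int) - 1) ((j : Int) - 1) + 2 * pvAt img ((i : Int) - 1) (j : Int)
        + pvAt img ((i : Int) - 1) ((j : Int) + 1) - pvAt img ((i : Int) + 1) ((j : Int) - 1)
        - 2 * pvAt img ((i : Int) + 1) (j : Int) - pvAt img ((i : Int) + 1) ((j : Int) + 1)|
    else 0))

-- the inner loop of A touches only row i: extract the row update
lemma pv_foldl_set2 (c : Nat → Prop) [DecidablePred c]
    (v : Nat → Int) (i : Nat) :
    ∀ (js : List Nat) (s : List (List Int)),
    js.foldl (fun s j => if c j then s.set i ((s.getD i []).set j (v j)) else s) s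
      = s.set i (js.foldl (fun r j => if c j then r.set j (v j) else r) (s.getD i [])) := by
  intro js
  induction js with
  | nil =>
    intro s
    simp only [List.foldl_nil]
    by_cases h : i < s.length
    · rw [List.getD_eq_getElem _ _ h, List.set_getElem_self]
    · rw [List.set_eq_of_length_le (by omega)]
  | cons j js ih =>
    intro s
    simp only [List.foldl_cons]
    by_cases hc : c j
    · simp only [if_pos hc]
      rw [ih]
      by_cases h : i < s.length
      · rw [List.set_set, List.getD_eq_getElem _ _ (by simpa using h),
          List.getElem_set_self]
      · rw [List.set_eq_of_length_le (a := (s.getD i []).set j (v j)) (by omega)]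
        have h1 : s.getD i [] = [] := by
          rw [List.getD_eq_default]; omega
        rw [h1]
        simp
    · simp only [if_neg hc]
      exact ih s


lemma pv_foldl_set_range {α : Type} (d : α) (g : Nat → α → α) :
    ∀ (n : Nat) (s : List α),
    (List.range n).foldl (fun s k => s.set k (g k (s.getD k d))) s
      = s.mapIdx (fun k x => if k < n then g k x else x) := by
  intro n
  induction n with
  | zero =>
    intro s
    apply List.ext_getElem <;> simp
  | succ n ih =>
    intro s
    rw [List.range_succ, List.foldl_append, ih, List.foldl_cons, List.foldl_nil]
    have hg : (s.mapIdx (fun k x => if k < n then g k x else x)).getD n d = s.getD n d := by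
      by_cases h : n < s.length
      · rw [List.getD_eq_getElem _ _ (by simpa using h), List.getD_eq_getElem _ _ h,
          List.getElem_mapIdx]
        simp
      · rw [List.getD_eq_default _ _ (by simpa using Nat.le_of_not_lt h),
          List.getD_eq_default _ _ (by omega)]
    rw [hg]
    apply List.ext_getElem
    · simp
    · intro k hk1 hk2
      simp only [List.length_set, List.length_mapIdx] at hk1 hk2
      by_cases hkn : k = n
      · subst hkn
        rw [List.getElem_set_self, List.getElem_mapIdx, if_pos (Nat.lt_succ_self k),
          List.getD_eq_getElem s d (by simpa using hk2)]
      · rw [List.getElem_set_ne (by omega), List.getElem_mapIdx, List.getElem_mapIdx]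
        have h2 : k < n ↔ k < n + 1 := by omega
        simp only [h2]

lemma pv_foldl_setif_range (c : Nat → Prop) [DecidablePred c] (F : Nat → Int) :
    ∀ (n : Nat) (r : List Int),
    (List.range n).foldl (fun r k => if c k then r.set k (F k) else r) r
      = r.mapIdx (fun k x => if k < n ∧ c k then F k else x) := by
  intro n
  induction n with
  | zero =>
    intro r
    apply List.ext_getElem <;> simp
  | succ n ih =>
    intro r
    rw [List.range_succ, List.foldl_append, ih, List.foldl_cons, List.foldl_nil]
    apply List.ext_getElem
    · by_cases hc : c n <;> simp [hc]
    · intro k hk1 hk2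
      simp only [List.length_mapIdx] at hk2
      by_cases hc : c n
      · simp only [if_pos hc]
        by_cases hkn : k = n
        · subst hkn
          rw [List.getElem_set_self, List.getElem_mapIdx]
          simp [hc]
        · rw [List.getElem_set_ne (by omega), List.getElem_mapIdx, List.getElem_mapIdx]
          have h2 : (k < n ∧ c k) ↔ (k < n + 1 ∧ c k) := by
            constructor <;> rintro ⟨h1, hx⟩ <;> exact ⟨by omega, hx⟩
          simp only [h2]
      · simp only [if_neg hc]
        rw [List.getElem_mapIdx, List.getElem_mapIdx]
        have h2 : (k < n ∧ c k) ↔ (k < n + 1 ∧ c k) := by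
          constructor <;> rintro ⟨h1, hx⟩
          · exact ⟨by omega, hx⟩
          · refine ⟨?_, hx⟩
            rcases Nat.lt_succ_iff_lt_or_eq.mp h1 with h | h
            · exact h
            · subst h; exact absurd hx hc
        simp only [h2]

lemma pv_a_canon (img : List (List Int)) (rows col : Int) :
    sobelyfun img rows col = pvCanon img rows col := by
  unfold sobelyfun
  rw [PySem.List.pyRange_one 0 rows, PySem.List.pyRange_one 0 col]
  simp only [Int.sub_zero, zero_add, List.foldl_map]
  simp only [PySem.List.pySetD_natCast, PySem.List.pyGetD_natCast]
  simp only [pv_foldl_set2, pv_foldl_set_range, pv_foldl_setif_range]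
  unfold pvCanon
  apply List.ext_getElem
  · simp
  · intro i hi1 hi2
    simp only [List.length_mapIdx, List.length_map, List.length_range] at hi1 hi2
    simp only [List.getElem_mapIdx, List.getElem_map, List.getElem_range, if_pos hi2]
    apply List.ext_getElem
    · simp
    · intro j hj1 hj2
      simp only [List.length_mapIdx, List.length_map, List.length_range] at hj1 hj2
      simp only [List.getElem_mapIdx, List.getElem_map, List.getElem_range]
      have hcond : (j < col.toNat ∧ (i : Int) - 1 ≥ 0 ∧ (j : Int) - 1 ≥ 0 ∧ (i : Int) + 1 < rows ∧ (j : Int) + 1 < col)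
          ↔ (1 ≤ (i : Int) ∧ 1 ≤ (j : Int) ∧ (i : Int) + 1 < rows ∧ (j : Int) + 1 < col) := by
        omega
      simp only [hcond]
      split_ifs with h
      · congr 1
        ring
      · rfl

lemma pv_b_canon (img : List (List Int)) (rows col : Int) :
    sobelyfun_alt img rows col = pvCanon img rows col := by
  unfold sobelyfun_alt pvCanon
  by_cases hdeg : rows < 3 ∨ col < 3
  · simp only [if_pos hdeg, PySem.List.pyRepeat_singleton, PySem.List.pyRange_one 0 rows,
      Int.sub_zero, List.map_map]
    apply List.ext_getElem
    · simp
    · intro i hi1 hi2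
      simp only [List.length_map, List.length_range] at hi1 hi2
      simp only [List.getElem_map, List.getElem_range, Function.comp]
      apply List.ext_getElem
      · simp
      · intro j hj1 hj2
        simp only [List.length_replicate, List.length_map, List.length_range] at hj1 hj2
        simp only [List.getElem_replicate, List.getElem_map, List.getElem_range]
        rw [if_neg (by omega)]
  · push Not at hdeg
    obtain ⟨hr, hc⟩ := hdeg
    rw [if_neg (by omega)]
    simp only [PySem.List.foldl_append_singleton_eq_map, PySem.List.pyRepeat_singleton]
    apply List.ext_getElem
    · simp only [List.length_append, List.length_map, List.length_range,
        PySem.List.length_pyRange_one, List.length_singleton]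
      omega
    · intro i hi1 hi2
      simp only [List.length_append, List.length_map, PySem.List.length_pyRange_one,
        List.length_singleton] at hi1
      simp only [List.length_map, List.length_range] at hi2
      rw [List.getElem_map, List.getElem_range]
      by_cases h0 : i = 0
      · subst h0
        rw [List.getElem_append_left (by simp), List.getElem_append_left (by simp),
          List.getElem_singleton]
        apply List.ext_getElem
        · simp
        · intro j hj1 hj2
          simp only [List.length_replicate] at hj1
          simp only [List.length_map, List.length_range] at hj2
          rw [List.getElem_replicate, List.getElem_map, List.getElem_range,
            if_neg (by omega)]
      · by_cases hlast : i = rows.toNat - 1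
        · rw [List.getElem_append_right (by simp [PySem.List.length_pyRange_one]; omega)]
          rw [List.getElem_singleton]
          apply List.ext_getElem
          · simp
          · intro j hj1 hj2
            simp only [List.length_replicate] at hj1
            simp only [List.length_map, List.length_range] at hj2
            rw [List.getElem_replicate, List.getElem_map, List.getElem_range,
              if_neg (by omega)]
        · -- middle row: 1 ≤ i < rows.toNat - 1
          rw [List.getElem_append_left (by simp [PySem.List.length_pyRange_one]; omega),
            List.getElem_append_right (by simp; omega),
            List.getElem_map, PySem.List.getElem_pyRange_one]
          simp only [List.length_singleton]
          have hx : (1 : Int) + ↑(i - 1) = ↑i := by omega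
          rw [hx]
          apply List.ext_getElem
          · simp [PySem.List.length_pyRange_one]
            omega
          · intro j hj1 hj2
            simp only [List.length_append, List.length_map, PySem.List.length_pyRange_one,
              List.length_singleton] at hj1
            simp only [List.length_map, List.length_range] at hj2
            rw [List.getElem_map, List.getElem_range]
            by_cases hj0 : j = 0
            · subst hj0
              rw [List.getElem_append_left (by simp), List.getElem_append_left (by simp),
                List.getElem_singleton, if_neg (by omega)]
            · by_cases hjlast : j = col.toNat - 1
              · rw [List.getElem_append_right (by simp [PySem.List.length_pyRange_one]; omega),
                  List.getElem_singleton, if_neg (by omega)]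
              · rw [List.getElem_append_left (by simp [PySem.List.length_pyRange_one]; omega),
                  List.getElem_append_right (by simp; omega),
                  List.getElem_map, PySem.List.getElem_pyRange_one]
                simp only [List.length_singleton, zero_add]
                simp only [pvAt]
                rw [PySem.List.pyGetD_map_pyRange_of_nonneg _ rows (↑i - 1) [] (by omega) (by omega)]
                rw [PySem.List.pyGetD_map_pyRange_of_nonneg _ rows (↑i + 1) [] (by omega) (by omega)]
                rw [PySem.List.pyGetD_map_pyRange_one _ 1 (col - 1) (j - 1) 0 (by omega)]
                rw [PySem.List.pyGetD_map_pyRange_one _ 1 (col - 1) (j - 1) 0 (by omega)]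
                have hj' : (1 : Int) + ↑(j - 1) = ↑j := by omega
                rw [hj', if_pos (by omega)]
                congr 1
                ring

-- ===== VERDICT (by name: the statement is the Claim_ definition above) =====
theorem sobelyfun_spec : Claim_equal_sobelyfun := by
  intro img rows col _ _
  unfold Spec_sobelyfun
  rw [pv_a_canon, pv_b_canon]
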